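-- pv_equiv track=rewrite | github.com/soberoy1112/Lintcode | my_answer/149.py | biggestDelta
-- ===== SOURCE A (Python) =====
-- def biggestDelta(l):
-- 	LL = []
-- 	D = {}
-- 	DD = {}
-- 	for i in range(len(l)):
-- 		for j in range(i + 1, len(l)):
-- 			delta = l[j] - l[i]
-- 			LL = [i, j]
-- 			D[str(LL)] = delta
-- 	for (key, value) in D.items():
-- 		if value == sorted(D.items(), key = lambda item:item[1])[-1][1]:
-- 			DD[key] = value
-- 	return DD
-- ===== SOURCE B (Python) =====
-- def biggestDelta(l):
--     n = len(l)
--     best = None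
--     for i in range(n):
--         for j in range(i + 1, n):
--             d = l[j] - l[i]
--             if best is None or d > best:
--                 best = d
--     res = {}
--     if best is not None:
--         for i in range(n):
--             for j in range(i + 1, n):
--                 if l[j] - l[i] == best:
--                     res['[%d, %d]' % (i, j)] = best
--     return res
-- ===== Notes on version B (the rewrite author's own statement) =====
-- stated objective: faster
-- what changed: B replaces A's dict of all O(n^2) pairs and its per-item re-sorting of that dict (O(n^2 log n) inside an O(n^2) loop) with a single running-max pass over the pairs followed by one collection pass for pairs matching the maximum.
import Mathlib
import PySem

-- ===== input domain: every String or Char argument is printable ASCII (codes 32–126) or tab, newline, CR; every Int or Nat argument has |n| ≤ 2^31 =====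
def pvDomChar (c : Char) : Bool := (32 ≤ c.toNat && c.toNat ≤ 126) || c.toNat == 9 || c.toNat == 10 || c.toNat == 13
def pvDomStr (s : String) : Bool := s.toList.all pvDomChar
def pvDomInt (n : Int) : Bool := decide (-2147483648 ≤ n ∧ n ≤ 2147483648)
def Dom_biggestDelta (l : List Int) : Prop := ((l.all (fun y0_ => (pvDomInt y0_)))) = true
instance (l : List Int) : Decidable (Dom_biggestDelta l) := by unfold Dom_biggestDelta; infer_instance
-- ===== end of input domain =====

-- ===== PORT A =====
-- B replaces A's all-pairs dict + per-item re-sort with one running-max pass and one collection pass (faster, asymptotic).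

-- str([i, j]) for two ints, built by hand (PySem has no str() of a list); exact: "[" ++ str(i) ++ ", " ++ str(j) ++ "]"
def pvKey (i j : Int) : String :=
  String.ofList ('[' :: (PySem.Int.toChars i ++ ',' :: ' ' :: PySem.Int.toChars j ++ [']']))

-- literal port of A: build D over all pairs, then keep the items whose value equals the
-- value of the last element of D.items() sorted by value. The pyGetD default ("", 0) sits
-- where Python's [-1] would raise IndexError; that point is unreachable (the loop body only
-- runs when D is non-empty).
def biggestDelta (l : List Int) : List (String × Int) :=
  let n : Int := l.length
  let D : PySem.Dict String Int :=
    (PySem.List.pyRange 0 n 1).foldl (fun D i =>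
      (PySem.List.pyRange (i + 1) n 1).foldl (fun D j =>
        D.insert (pvKey i j) (PySem.List.pyGetD l j 0 - PySem.List.pyGetD l i 0)) D)
      PySem.Dict.empty
  let DD : PySem.Dict String Int :=
    D.items.foldl (fun DD kv =>
      if kv.2 = (PySem.List.pyGetD (PySem.List.sorted D.items (fun item => item.2) false) (-1) ("", 0)).2
      then DD.insert kv.1 kv.2 else DD) PySem.Dict.empty
  DD.items

-- ===== PORT B =====
-- literal port of B (Source B): running max over all pair deltas, then one collection pass.
def biggestDelta_alt (l : List Int) : List (String × Int) :=
  let n : Int := l.length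
  let best : Option Int :=
    (PySem.List.pyRange 0 n 1).foldl (fun b i =>
      (PySem.List.pyRange (i + 1) n 1).foldl (fun b j =>
        let d := PySem.List.pyGetD l j 0 - PySem.List.pyGetD l i 0
        match b with
        | none => some d
        | some m => if d > m then some d else some m) b) none
  match best with
  | none => []
  | some m =>
    ((PySem.List.pyRange 0 n 1).foldl (fun r i =>
      (PySem.List.pyRange (i + 1) n 1).foldl (fun r j =>
        if PySem.List.pyGetD l j 0 - PySem.List.pyGetD l i 0 = m
        then r.insert (pvKey i j) m else r) r) (PySem.Dict.empty : PySem.Dict String Int)).items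

-- ===== PRECONDITION & SPEC =====
def Spec_biggestDelta (l : List Int) (out : List (String × Int)) : Prop := out = biggestDelta_alt l
instance (l : List Int) (out : List (String × Int)) : Decidable (Spec_biggestDelta l out) := by unfold Spec_biggestDelta; infer_instance

-- ===== CLAIM (what is proved, stated in full; the proofs are below) =====
def Claim_equal_biggestDelta : Prop := ∀ (l : List Int), Dom_biggestDelta l → Spec_biggestDelta l (biggestDelta l)

-- ===== LEMMAS AND PROOFS =====

-- ---- proof-side abbreviations ----
def pvPairs (n : Int) : List (Int × Int) :=
  (PySem.List.pyRange 0 n 1).flatMap (fun i => (PySem.List.pyRange (i + 1) n 1).map (fun j => (i, j)))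

def pvStep (b : Option Int) (d : Int) : Option Int :=
  match b with
  | none => some d
  | some m => if d > m then some d else some m

-- a nested for-loop over range pairs is a single fold over the pair list
theorem pv_fold2 {γ : Type} (f : γ → Int → Int → γ) (n : Int) (init : γ) :
    (PySem.List.pyRange 0 n 1).foldl (fun c i =>
      (PySem.List.pyRange (i + 1) n 1).foldl (fun c j => f c i j) c) init
    = (pvPairs n).foldl (fun c p => f c p.1 p.2) init := by
  unfold pvPairs
  generalize PySem.List.pyRange 0 n 1 = xs
  induction xs generalizing init with
  | nil => rfl
  | cons a t ih =>
    simp only [List.flatMap_cons, List.foldl_cons, List.foldl_append, List.foldl_map]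
    exact ih _

-- ---- decimal digits: str(n) is injective on nonnegative ints and contains only digits ----
theorem pv_toDigitsCore_append (fuel : Nat) : ∀ (n : Nat) (ds : List Char),
    Nat.toDigitsCore 10 fuel n ds = Nat.toDigitsCore 10 fuel n [] ++ ds := by
  induction fuel with
  | zero => intro n ds; simp [Nat.toDigitsCore]
  | succ f ih =>
    intro n ds
    simp only [Nat.toDigitsCore]
    by_cases h : n / 10 = 0
    · simp [h]
    · simp only [h, ite_false]
      rw [ih (n / 10) ((n % 10).digitChar :: ds), ih (n / 10) [(n % 10).digitChar]]
      simp

theorem pv_digitChar_toNat {m : Nat} (h : m < 10) : (Nat.digitChar m).toNat = 48 + m := by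
  interval_cases m <;> rfl

theorem pv_evalCore (fuel : Nat) : ∀ (n a : Nat), n < fuel →
    (Nat.toDigitsCore 10 fuel n []).foldl (fun a c => a * 10 + (c.toNat - 48)) a
      = a * 10 ^ (Nat.toDigitsCore 10 fuel n []).length + n := by
  induction fuel with
  | zero => intro n a h; omega
  | succ f ih =>
    intro n a h
    by_cases h0 : n / 10 = 0
    · have hd := pv_digitChar_toNat (Nat.mod_lt n (show 0 < 10 by norm_num))
      simp [Nat.toDigitsCore, h0, hd, pow_succ]
      omega
    · have hpos : 0 < n := by
        rcases Nat.eq_zero_or_pos n with h' | h'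
        · exfalso; apply h0; simp [h']
        · exact h'
      have hlt : n / 10 < f := by
        have := Nat.div_lt_self hpos (by norm_num : 1 < 10)
        omega
      simp only [Nat.toDigitsCore, h0, ite_false]
      rw [pv_toDigitsCore_append f (n / 10) [(n % 10).digitChar]]
      rw [List.foldl_append, List.length_append]
      rw [ih (n / 10) a hlt]
      simp only [List.foldl_cons, List.foldl_nil, List.length_cons, List.length_nil]
      rw [pv_digitChar_toNat (Nat.mod_lt n (by norm_num))]
      have h48 : 48 + n % 10 - 48 = n % 10 := by omega
      rw [h48, pow_succ]
      have := Nat.div_add_mod n 10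
      ring_nf
      omega

theorem pv_toDigits_inj {a b : Nat} (h : Nat.toDigits 10 a = Nat.toDigits 10 b) : a = b := by
  have ha := pv_evalCore (a + 1) a 0 (by omega)
  have hb := pv_evalCore (b + 1) b 0 (by omega)
  unfold Nat.toDigits at h
  rw [h] at ha
  rw [hb] at ha
  omega

theorem pv_toDigitsCore_digits (fuel : Nat) : ∀ (n : Nat), n < fuel →
    ∀ c ∈ Nat.toDigitsCore 10 fuel n [], 48 ≤ c.toNat ∧ c.toNat ≤ 57 := by
  induction fuel with
  | zero => intro n h; omega
  | succ f ih =>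
    intro n h c hc
    by_cases h0 : n / 10 = 0
    · simp [Nat.toDigitsCore, h0] at hc
      subst hc
      have := pv_digitChar_toNat (Nat.mod_lt n (show 0 < 10 by norm_num))
      omega
    · have hpos : 0 < n := by
        rcases Nat.eq_zero_or_pos n with h' | h'
        · exfalso; apply h0; simp [h']
        · exact h'
      have hlt : n / 10 < f := by
        have := Nat.div_lt_self hpos (by norm_num : 1 < 10)
        omega
      simp only [Nat.toDigitsCore, h0, ite_false] at hc
      rw [pv_toDigitsCore_append f (n / 10) [(n % 10).digitChar]] at hc
      rw [List.mem_append] at hc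
      rcases hc with hc | hc
      · exact ih (n / 10) hlt c hc
      · simp at hc
        subst hc
        have := pv_digitChar_toNat (Nat.mod_lt n (show 0 < 10 by norm_num))
        omega

theorem pv_toChars_nonneg {i : Int} (h : 0 ≤ i) :
    PySem.Int.toChars i = Nat.toDigits 10 i.toNat := by
  simp [PySem.Int.toChars, not_lt.mpr h]

theorem pv_split_at_comma : ∀ (A A' X X' : List Char), ',' ∉ A → ',' ∉ A' →
    A ++ ',' :: X = A' ++ ',' :: X' → A = A' ∧ X = X' := by
  intro A
  induction A with
  | nil =>
    intro A' X X' _ hA' h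
    cases A' with
    | nil => simpa using h
    | cons c t =>
      rw [List.nil_append, List.cons_append] at h
      obtain ⟨h1, _⟩ := List.cons.inj h
      exact absurd (by simp [← h1]) hA'
  | cons a A ih =>
    intro A' X X' hA hA' h
    cases A' with
    | nil =>
      rw [List.cons_append, List.nil_append] at h
      obtain ⟨h1, _⟩ := List.cons.inj h
      exact absurd (by simp [h1]) hA
    | cons c t =>
      rw [List.cons_append, List.cons_append] at h
      obtain ⟨h1, h2⟩ := List.cons.inj h
      have hA2 : ',' ∉ A := fun hm => hA (List.mem_cons_of_mem _ hm)
      have hA'2 : ',' ∉ t := fun hm => hA' (List.mem_cons_of_mem _ hm)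
      obtain ⟨he, hx⟩ := ih t X X' hA2 hA'2 h2
      exact ⟨by rw [h1, he], hx⟩

theorem pv_comma_notin_toChars {i : Int} (h : 0 ≤ i) : ',' ∉ PySem.Int.toChars i := by
  rw [pv_toChars_nonneg h]
  intro hc
  have := pv_toDigitsCore_digits (i.toNat + 1) i.toNat (by omega) ',' hc
  have h44 : (',' : Char).toNat = 44 := by decide
  omega

theorem pvKey_inj {i j i' j' : Int} (hi : 0 ≤ i) (hj : 0 ≤ j) (hi' : 0 ≤ i') (hj' : 0 ≤ j')
    (h : pvKey i j = pvKey i' j') : i = i' ∧ j = j' := by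
  unfold pvKey at h
  have h' := String.ofList_inj.mp h
  obtain ⟨-, h2⟩ := List.cons.inj h'
  simp only [List.append_assoc, List.cons_append] at h2
  obtain ⟨hA, hX⟩ := pv_split_at_comma _ _ _ _ (pv_comma_notin_toChars hi) (pv_comma_notin_toChars hi') h2
  obtain ⟨-, h3⟩ := List.cons.inj hX
  have hB := List.append_cancel_right h3
  constructor
  · rw [pv_toChars_nonneg hi, pv_toChars_nonneg hi'] at hA
    have := pv_toDigits_inj hA
    omega
  · rw [pv_toChars_nonneg hj, pv_toChars_nonneg hj'] at hB
    have := pv_toDigits_inj hB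
    omega

-- ---- the pair list ----
theorem pv_mem_pvPairs {n : Int} {p : Int × Int} :
    p ∈ pvPairs n ↔ 0 ≤ p.1 ∧ p.1 < p.2 ∧ p.2 < n := by
  unfold pvPairs
  simp only [List.mem_flatMap, List.mem_map, PySem.List.mem_pyRange_one]
  constructor
  · rintro ⟨i, ⟨hi0, hin⟩, j, ⟨hj1, hj2⟩, rfl⟩
    exact ⟨hi0, by omega, hj2⟩
  · rintro ⟨h1, h2, h3⟩
    exact ⟨p.1, ⟨h1, by omega⟩, p.2, ⟨by omega, h3⟩, rfl⟩

theorem pv_nodup_pyRange_one (a b : Int) : (PySem.List.pyRange a b 1).Nodup := by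
  rw [PySem.List.pyRange_of_pos a b (by norm_num : (0:Int) < 1)]
  exact (List.nodup_range).map (fun x y hxy => by omega)

theorem pv_nodup_pvPairs (n : Int) : (pvPairs n).Nodup := by
  unfold pvPairs
  have hx := pv_nodup_pyRange_one 0 n
  generalize PySem.List.pyRange 0 n 1 = xs at hx
  induction xs with
  | nil => simp
  | cons a t ih =>
    simp only [List.flatMap_cons]
    rw [List.nodup_append]
    refine ⟨?_, ih (List.Nodup.of_cons hx), ?_⟩
    · exact (pv_nodup_pyRange_one _ _).map (fun x y hxy => (Prod.mk.inj hxy).2)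
    · intro p hp q hq
      simp only [List.mem_map] at hp
      obtain ⟨j, -, rfl⟩ := hp
      simp only [List.mem_flatMap, List.mem_map] at hq
      obtain ⟨i, hi, j', -, rfl⟩ := hq
      intro he
      have hai : a = i := (Prod.mk.inj he).1
      rw [List.nodup_cons] at hx
      exact hx.1 (hai ▸ hi)

theorem pv_nodup_keys (n : Int) : ((pvPairs n).map (fun p => pvKey p.1 p.2)).Nodup := by
  apply List.Nodup.map_on _ (pv_nodup_pvPairs n)
  intro p hp q hq hk
  have hp' := pv_mem_pvPairs.mp hp
  have hq' := pv_mem_pvPairs.mp hq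
  have := pvKey_inj (by omega) (by omega) (by omega) (by omega) hk
  exact Prod.ext this.1 this.2

-- ---- the running max ----
theorem pv_optmax_some : ∀ (vs : List Int) (a : Int),
    ∃ M, vs.foldl pvStep (some a) = some M ∧ (M = a ∨ M ∈ vs) ∧ a ≤ M ∧ ∀ v ∈ vs, v ≤ M := by
  intro vs
  induction vs with
  | nil => intro a; exact ⟨a, rfl, Or.inl rfl, le_refl a, by simp⟩
  | cons v t ih =>
    intro a
    obtain ⟨M, hM, hmem, hle, hub⟩ := ih (if v > a then v else a)
    refine ⟨M, ?_, ?_, ?_, ?_⟩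
    · simpa [pvStep, apply_ite Option.some] using hM
    · rcases hmem with h | h
      · by_cases hva : v > a
        · simp [hva] at h; exact Or.inr (by simp [h])
        · simp [hva] at h; exact Or.inl h
      · exact Or.inr (List.mem_cons_of_mem _ h)
    · by_cases hva : v > a
      · simp [hva] at hle; omega
      · simpa [hva] using hle
    · intro w hw
      rcases List.mem_cons.mp hw with rfl | hw
      · by_cases hva : w > a
        · simp [hva] at hle; omega
        · simp [hva] at hle; omega
      · exact hub w hw

-- ---- xs[-1] on a non-empty list ----
theorem pv_pyGetD_neg_one {α : Type} (xs : List α) (d : α) (h : 0 < xs.length) :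
    PySem.List.pyGetD xs (-1) d = xs[xs.length - 1]'(by omega) := by
  simp only [PySem.List.pyGetD, PySem.List.pyGet?, PySem.List.pyIdx?]
  have h1 : ¬ (0:Int) ≤ -1 := by norm_num
  have h2 : -(xs.length : Int) ≤ -1 := by omega
  simp only [h1, if_false, h2, if_true]
  have h3 : ((-(-1 : Int)).toNat) = 1 := by decide
  rw [h3]
  simp only [Option.bind_some,
    List.getElem?_eq_getElem (show xs.length - 1 < xs.length by omega), Option.getD_some]

-- ---- the last element of sorted-by-value is a maximum ----
theorem pv_sorted_last_max {items : List (String × Int)} (h : items ≠ []) :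
    (PySem.List.pyGetD (PySem.List.sorted items (fun item => item.2) false) (-1) ("", 0)).2 ∈ items.map (·.2)
    ∧ ∀ v ∈ items.map (·.2), v ≤ (PySem.List.pyGetD (PySem.List.sorted items (fun item => item.2) false) (-1) ("", 0)).2 := by
  have hlen : 0 < (PySem.List.sorted items (fun item => item.2) false).length := by
    rw [PySem.List.length_sorted]
    exact List.length_pos_of_ne_nil h
  rw [pv_pyGetD_neg_one _ _ hlen]
  constructor
  · apply List.mem_map_of_mem
    exact (PySem.List.sorted_perm items (fun item => item.2) false).mem_iff.mp (List.getElem_mem _)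
  · intro v hv
    obtain ⟨y, hy, rfl⟩ := List.mem_map.mp hv
    have hyS : y ∈ PySem.List.sorted items (fun item => item.2) false :=
      (PySem.List.sorted_perm items (fun item => item.2) false).mem_iff.mpr hy
    obtain ⟨k, hk, rfl⟩ := List.mem_iff_getElem.mp hyS
    exact PySem.List.key_sorted_getElem_mono items (fun item => item.2) (by omega) (by omega)


-- ---- normal forms of the two ports ----
theorem pv_items_empty : (PySem.Dict.empty : PySem.Dict String Int).items = [] := rfl

theorem pv_D_items (l : List Int) :
    ((PySem.List.pyRange 0 (l.length : Int) 1).foldl (fun D i =>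
      (PySem.List.pyRange (i + 1) (l.length : Int) 1).foldl (fun D j =>
        PySem.Dict.insert D (pvKey i j) (PySem.List.pyGetD l j 0 - PySem.List.pyGetD l i 0)) D)
      (PySem.Dict.empty : PySem.Dict String Int)).items
    = (pvPairs (l.length : Int)).map (fun p => (pvKey p.1 p.2, PySem.List.pyGetD l p.2 0 - PySem.List.pyGetD l p.1 0)) := by
  rw [pv_fold2 (f := fun (D : PySem.Dict String Int) i j =>
    PySem.Dict.insert D (pvKey i j) (PySem.List.pyGetD l j 0 - PySem.List.pyGetD l i 0))]
  rw [PySem.Dict.items_foldl_insert_fresh (pvPairs (l.length : Int)) (fun p => pvKey p.1 p.2)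
    (fun p => PySem.List.pyGetD l p.2 0 - PySem.List.pyGetD l p.1 0) PySem.Dict.empty
    (fun a _ => PySem.Dict.contains_empty _) (pv_nodup_keys _)]
  rfl

theorem pv_B_best (l : List Int) :
    ((PySem.List.pyRange 0 (l.length : Int) 1).foldl (fun b i =>
      (PySem.List.pyRange (i + 1) (l.length : Int) 1).foldl (fun b j =>
        let d := PySem.List.pyGetD l j 0 - PySem.List.pyGetD l i 0
        match b with
        | none => some d
        | some m => if d > m then some d else some m) b) none)
    = ((pvPairs (l.length : Int)).map (fun p => PySem.List.pyGetD l p.2 0 - PySem.List.pyGetD l p.1 0)).foldl pvStep none := by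
  rw [pv_fold2]
  rw [List.foldl_map]
  rfl

theorem pv_A_filter (l : List Int) (M : Int) :
    (((pvPairs (l.length : Int)).map (fun p => (pvKey p.1 p.2, PySem.List.pyGetD l p.2 0 - PySem.List.pyGetD l p.1 0))).foldl
      (fun DD kv => if kv.2 = M then PySem.Dict.insert DD kv.1 kv.2 else DD)
      (PySem.Dict.empty : PySem.Dict String Int)).items
    = ((pvPairs (l.length : Int)).filter (fun p => decide (PySem.List.pyGetD l p.2 0 - PySem.List.pyGetD l p.1 0 = M))).map
        (fun p => (pvKey p.1 p.2, M)) := by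
  generalize hIT : (pvPairs (l.length : Int)).map (fun p => (pvKey p.1 p.2, PySem.List.pyGetD l p.2 0 - PySem.List.pyGetD l p.1 0)) = IT
  have hnd2 : (IT.map Prod.fst).Nodup := by
    rw [← hIT, List.map_map]
    exact pv_nodup_keys _
  have hnd : ((IT.filter (fun x => decide (x.2 = M))).map Prod.fst).Nodup :=
    List.Nodup.sublist (List.Sublist.map Prod.fst List.filter_sublist) hnd2
  rw [PySem.List.foldl_ite_eq_foldl_filter (p := fun (kv : String × Int) => kv.2 = M)
    (f := fun (DD : PySem.Dict String Int) kv => PySem.Dict.insert DD kv.1 kv.2)]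
  rw [PySem.Dict.items_foldl_insert_fresh _ Prod.fst Prod.snd PySem.Dict.empty
    (fun a _ => PySem.Dict.contains_empty _) hnd]
  rw [pv_items_empty, List.nil_append]
  rw [← hIT]
  rw [List.filter_map]
  rw [show ((fun (x : String × Int) => decide (x.2 = M)) ∘ (fun (p : Int × Int) => (pvKey p.1 p.2, PySem.List.pyGetD l p.2 0 - PySem.List.pyGetD l p.1 0)))
      = (fun (p : Int × Int) => decide (PySem.List.pyGetD l p.2 0 - PySem.List.pyGetD l p.1 0 = M)) from rfl]
  rw [List.map_map]
  apply List.map_congr_left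
  intro p hp
  have hd := of_decide_eq_true ((List.mem_filter.mp hp).2)
  show (pvKey p.1 p.2, PySem.List.pyGetD l p.2 0 - PySem.List.pyGetD l p.1 0) = (pvKey p.1 p.2, M)
  rw [show PySem.List.pyGetD l p.2 0 - PySem.List.pyGetD l p.1 0 = M from hd]

theorem pv_B_res (l : List Int) (M : Int) :
    ((PySem.List.pyRange 0 (l.length : Int) 1).foldl (fun r i =>
      (PySem.List.pyRange (i + 1) (l.length : Int) 1).foldl (fun r j =>
        if PySem.List.pyGetD l j 0 - PySem.List.pyGetD l i 0 = M
        then PySem.Dict.insert r (pvKey i j) M else r) r)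
      (PySem.Dict.empty : PySem.Dict String Int)).items
    = ((pvPairs (l.length : Int)).filter (fun p => decide (PySem.List.pyGetD l p.2 0 - PySem.List.pyGetD l p.1 0 = M))).map
        (fun p => (pvKey p.1 p.2, M)) := by
  rw [pv_fold2 (f := fun (r : PySem.Dict String Int) i j =>
    if PySem.List.pyGetD l j 0 - PySem.List.pyGetD l i 0 = M
    then PySem.Dict.insert r (pvKey i j) M else r)]
  have hkeys : ((pvPairs (l.length : Int)).map (fun p => pvKey p.1 p.2)).Nodup := pv_nodup_keys _
  generalize hP : pvPairs (l.length : Int) = P at hkeys ⊢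
  have hnd : ((P.filter (fun x => decide (PySem.List.pyGetD l x.2 0 - PySem.List.pyGetD l x.1 0 = M))).map
      (fun p => pvKey p.1 p.2)).Nodup :=
    List.Nodup.sublist (List.Sublist.map _ List.filter_sublist) hkeys
  rw [PySem.List.foldl_ite_eq_foldl_filter
    (p := fun (p : Int × Int) => PySem.List.pyGetD l p.2 0 - PySem.List.pyGetD l p.1 0 = M)
    (f := fun (r : PySem.Dict String Int) p => PySem.Dict.insert r (pvKey p.1 p.2) M)]
  have h := PySem.Dict.items_foldl_insert_fresh
    (P.filter (fun x => decide (PySem.List.pyGetD l x.2 0 - PySem.List.pyGetD l x.1 0 = M)))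
    (fun (p : Int × Int) => pvKey p.1 p.2) (fun _ => M)
    (PySem.Dict.empty : PySem.Dict String Int)
    (fun a _ => PySem.Dict.contains_empty (pvKey a.1 a.2)) hnd
  exact h.trans rfl

theorem pv_main (l : List Int) : biggestDelta l = biggestDelta_alt l := by
  simp only [biggestDelta, biggestDelta_alt]
  rw [pv_D_items l, pv_B_best l]
  by_cases hP : pvPairs (l.length : Int) = []
  · rw [hP]; rfl
  · obtain ⟨p0, Pt, hcons⟩ := List.exists_cons_of_ne_nil hP
    obtain ⟨M, hM, hmem, hle, hub⟩ :=
      pv_optmax_some (Pt.map (fun p => PySem.List.pyGetD l p.2 0 - PySem.List.pyGetD l p.1 0))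
        (PySem.List.pyGetD l p0.2 0 - PySem.List.pyGetD l p0.1 0)
    have hsc : ((pvPairs (l.length : Int)).map (fun p => PySem.List.pyGetD l p.2 0 - PySem.List.pyGetD l p.1 0)).foldl pvStep none = some M := by
      rw [hcons]
      simp only [List.map_cons, List.foldl_cons]
      exact hM
    rw [hsc]
    have hne : (pvPairs (l.length : Int)).map (fun p => (pvKey p.1 p.2, PySem.List.pyGetD l p.2 0 - PySem.List.pyGetD l p.1 0)) ≠ [] := by
      rw [hcons]; simp
    obtain ⟨hCmem, hCub⟩ := pv_sorted_last_max hne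
    have hvs : ((pvPairs (l.length : Int)).map (fun p => (pvKey p.1 p.2, PySem.List.pyGetD l p.2 0 - PySem.List.pyGetD l p.1 0))).map (·.2)
        = (pvPairs (l.length : Int)).map (fun p => PySem.List.pyGetD l p.2 0 - PySem.List.pyGetD l p.1 0) := by
      rw [List.map_map]
      rfl
    have hMmem : M ∈ (pvPairs (l.length : Int)).map (fun p => PySem.List.pyGetD l p.2 0 - PySem.List.pyGetD l p.1 0) := by
      rw [hcons, List.map_cons]
      rcases hmem with h | h
      · exact h ▸ List.mem_cons_self
      · exact List.mem_cons_of_mem _ h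
    have hMub : ∀ v ∈ (pvPairs (l.length : Int)).map (fun p => PySem.List.pyGetD l p.2 0 - PySem.List.pyGetD l p.1 0), v ≤ M := by
      intro v hv
      rw [hcons, List.map_cons] at hv
      rcases List.mem_cons.mp hv with rfl | hv'
      · exact hle
      · exact hub _ hv'
    have hCM : (PySem.List.pyGetD (PySem.List.sorted ((pvPairs (l.length : Int)).map (fun p => (pvKey p.1 p.2, PySem.List.pyGetD l p.2 0 - PySem.List.pyGetD l p.1 0))) (fun item => item.2) false) (-1) ("", 0)).2 = M :=
      le_antisymm (hMub _ (hvs ▸ hCmem)) (hCub _ (hvs.symm ▸ hMmem))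
    rw [hCM]
    exact (pv_A_filter l M).trans (pv_B_res l M).symm


-- ===== VERDICT (by name: the statement is the Claim_ definition above) =====
theorem biggestDelta_spec : Claim_equal_biggestDelta := by
  intro l _
  unfold Spec_biggestDelta
  exact pv_main l
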